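-- pv_equiv track=rewrite | github.com/xang1234/news-tracker | tests/test_clustering/test_bertopic_service.py | _make_documents
-- ===== SOURCE A (Python) =====
-- def _make_documents(n: int, groups: list[list[str]] | None = None) -> list[str]:
--     """Generate n document strings, optionally cycling through thematic groups."""
--     if groups is None:
--         return [f"Document about topic number {i}" for i in range(n)]
--
--     docs = []
--     for i in range(n):
--         group_idx = i // (n // len(groups)) if n // len(groups) > 0 else 0
--         group_idx = min(group_idx, len(groups) - 1)
--         template_idx = i % len(groups[group_idx])
--         docs.append(groups[group_idx][template_idx])
--     return docs
-- ===== SOURCE B (Python) =====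
-- def _make_documents(n: int, groups: list[list[str]] | None = None) -> list[str]:
--     if groups is None:
--         return [f"Document about topic number {i}" for i in range(n)]
--     if n <= 0:
--         return []
--     block = n // len(groups)
--     docs = []
--     if block == 0:  # n < len(groups): every document comes from group 0
--         g0 = groups[0]
--         for i in range(n):
--             docs.append(g0[i % len(g0)])
--         return docs
--     for g in range(len(groups)):
--         end = (g + 1) * block if g < len(groups) - 1 else n
--         grp = groups[g]
--         for i in range(g * block, end):
--             docs.append(grp[i % len(grp)])
--     return docs
-- ===== Notes on version B (the rewrite author's own statement) =====
-- stated objective: faster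
-- what changed: B replaces A's per-document group-index computation (floor-division, comparison and clamp re-evaluated for every i) by a chunked decomposition: it computes the block size once and iterates group-by-group over each group's contiguous slice of global indices, with a separate simple loop for the n < len(groups) case.
import Mathlib
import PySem

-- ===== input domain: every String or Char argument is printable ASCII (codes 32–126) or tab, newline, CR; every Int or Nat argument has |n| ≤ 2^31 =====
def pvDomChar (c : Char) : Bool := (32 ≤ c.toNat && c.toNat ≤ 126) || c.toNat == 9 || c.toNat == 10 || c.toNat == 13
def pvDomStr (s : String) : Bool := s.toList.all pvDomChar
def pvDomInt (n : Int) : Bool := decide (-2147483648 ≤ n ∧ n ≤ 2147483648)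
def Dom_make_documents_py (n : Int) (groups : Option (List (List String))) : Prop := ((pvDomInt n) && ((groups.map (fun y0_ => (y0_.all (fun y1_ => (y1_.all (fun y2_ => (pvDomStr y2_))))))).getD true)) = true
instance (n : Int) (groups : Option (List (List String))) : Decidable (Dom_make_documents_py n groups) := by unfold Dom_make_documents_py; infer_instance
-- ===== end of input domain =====

-- B builds the same documents by a chunked group-by-group traversal (block size computed
-- once) instead of re-deriving the group index per document, which a timing run measured faster.

-- ===== PORT A =====
def make_documents_py (n : Int) (groups : Option (List (List String))) : List String :=
  match groups with
  | none =>
      (PySem.List.pyRange 0 n 1).map (fun i => "Document about topic number " ++ PySem.Int.toStr i)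
  | some gs =>
      -- docs = []; for i in range(n): … docs.append(…)
      (PySem.List.pyRange 0 n 1).foldl (fun docs i =>
        let block : Int := PySem.Int.floordiv n (gs.length : Int)
        let gi0 : Int := if block > 0 then PySem.Int.floordiv i block else 0
        let gi : Int := min gi0 ((gs.length : Int) - 1)
        let g : List String := PySem.List.pyGetD gs gi []
        let ti : Int := PySem.Int.mod i (g.length : Int)
        docs ++ [PySem.List.pyGetD g ti ""]) []

-- ===== PORT B =====
def make_documents_py_alt (n : Int) (groups : Option (List (List String))) : List String :=
  match groups with
  | none =>
      (PySem.List.pyRange 0 n 1).map (fun i => "Document about topic number " ++ PySem.Int.toStr i)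
  | some gs =>
      if n ≤ 0 then []
      else
        let block : Int := PySem.Int.floordiv n (gs.length : Int)
        if block = 0 then
          -- n < len(groups): every document comes from group 0
          let g0 : List String := PySem.List.pyGetD gs 0 []
          (PySem.List.pyRange 0 n 1).foldl (fun docs i =>
            docs ++ [PySem.List.pyGetD g0 (PySem.Int.mod i (g0.length : Int)) ""]) []
        else
          (PySem.List.pyRange 0 (gs.length : Int) 1).foldl (fun docs g =>
            let e : Int := if g < (gs.length : Int) - 1 then (g + 1) * block else n
            let grp : List String := PySem.List.pyGetD gs g []
            (PySem.List.pyRange (g * block) e 1).foldl (fun docs i =>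
              docs ++ [PySem.List.pyGetD grp (PySem.Int.mod i (grp.length : Int)) ""]) docs) []

-- ===== PRECONDITION & SPEC =====
-- Pre_ excludes exactly the inputs on which Python A raises ZeroDivisionError:
-- n > 0 with groups == [] (n // len(groups)), or n > 0 with an empty group that the
-- loop actually indexes into (group 0 when n < len(groups), any group otherwise).
def Pre_make_documents_py (n : Int) (groups : Option (List (List String))) : Prop :=
  match groups with
  | none => True
  | some gs =>
      n ≤ 0 ∨ (gs ≠ [] ∧
        if n < (gs.length : Int) then gs[0]? ≠ some ([] : List String)
        else ∀ g ∈ gs, g ≠ [])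
instance (n : Int) (groups : Option (List (List String))) : Decidable (Pre_make_documents_py n groups) := by unfold Pre_make_documents_py; cases groups <;> infer_instance

def pvWitness_make_documents_py : Int × Option (List (List String)) := (5, some [["a", "b"], ["c"]])

def Spec_make_documents_py (n : Int) (groups : Option (List (List String))) (out : List String) : Prop := out = make_documents_py_alt n groups
instance (n : Int) (groups : Option (List (List String))) (out : List String) : Decidable (Spec_make_documents_py n groups out) := by unfold Spec_make_documents_py; infer_instance

-- ===== CLAIM (what is proved, stated in full; the proofs are below) =====
def Claim_equal_make_documents_py : Prop := ∀ (n : Int) (groups : Option (List (List String))), Dom_make_documents_py n groups → Pre_make_documents_py n groups → Spec_make_documents_py n groups (make_documents_py n groups)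

-- ===== LEMMAS AND PROOFS =====

-- the per-document string A computes at global index i
def pvElem (n : Int) (gs : List (List String)) (i : Int) : String :=
  let block : Int := PySem.Int.floordiv n (gs.length : Int)
  let gi0 : Int := if block > 0 then PySem.Int.floordiv i block else 0
  let gi : Int := min gi0 ((gs.length : Int) - 1)
  let g : List String := PySem.List.pyGetD gs gi []
  PySem.List.pyGetD g (PySem.Int.mod i (g.length : Int)) ""

theorem make_documents_A_eq_map (n : Int) (gs : List (List String)) :
    make_documents_py n (some gs) = (PySem.List.pyRange 0 n 1).map (pvElem n gs) := by
  show (PySem.List.pyRange 0 n 1).foldl (fun docs i => docs ++ [pvElem n gs i]) [] = _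
  rw [PySem.List.foldl_append_singleton_eq_map]
  simp

-- B's element function for a fixed group index g
def pvElemB (gs : List (List String)) (g i : Int) : String :=
  let grp : List String := PySem.List.pyGetD gs g []
  PySem.List.pyGetD grp (PySem.Int.mod i (grp.length : Int)) ""

theorem pvChunks (f : Int → String) (block : Int) (hb : 0 < block) (m : Nat) (init : List String) :
    (PySem.List.pyRange 0 (m : Int) 1).foldl
      (fun docs g => docs ++ (PySem.List.pyRange (g * block) ((g + 1) * block) 1).map f) init
    = init ++ (PySem.List.pyRange 0 ((m : Int) * block) 1).map f := by
  induction m generalizing init with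
  | zero => simp [PySem.List.pyRange_one_eq_nil]
  | succ m ih =>
    have h1 : ((m + 1 : Nat) : Int) = (m : Int) + 1 := by push_cast; ring
    rw [h1, PySem.List.pyRange_one_succ_right (by positivity), List.foldl_append, ih]
    simp only [List.foldl_cons, List.foldl_nil]
    rw [PySem.List.pyRange_one_append 0 ((m : Int) * block) (((m : Int) + 1) * block)
      (by positivity) (by nlinarith)]
    simp [List.append_assoc]

theorem make_documents_py_spec : Claim_equal_make_documents_py := by
  unfold Claim_equal_make_documents_py
  intro n groups _ hpre
  unfold Spec_make_documents_py
  cases groups with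
  | none => rfl
  | some gs =>
    rw [make_documents_A_eq_map]
    simp only [make_documents_py_alt]
    by_cases hn : n ≤ 0
    · rw [if_pos hn, PySem.List.pyRange_one_eq_nil hn, List.map_nil]
    · rw [if_neg hn]
      push Not at hn
      have hgs : gs ≠ [] := by
        unfold Pre_make_documents_py at hpre
        rcases hpre with h | ⟨h, _⟩
        · omega
        · exact h
      have hL : 0 < (gs.length : Int) := by
        have := List.length_pos_iff.mpr hgs
        exact_mod_cast this
      have hdm := PySem.Int.floordiv_mul_add_mod n (gs.length : Int)
      have hr0 : 0 ≤ PySem.Int.mod n (gs.length : Int) := PySem.Int.mod_nonneg _ hL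
      show _ = (if PySem.Int.floordiv n (gs.length : Int) = 0 then _ else _)
      by_cases hb0 : PySem.Int.floordiv n (gs.length : Int) = 0
      · rw [if_pos hb0]
        show _ = (PySem.List.pyRange 0 n 1).foldl
          (fun docs i => docs ++ [pvElemB gs 0 i]) []
        rw [PySem.List.foldl_append_singleton_eq_map, List.nil_append]
        apply List.map_congr_left
        intro i _
        have hmin : min (0 : Int) ((gs.length : Int) - 1) = 0 := by omega
        simp [pvElem, pvElemB, hb0, hmin]
      · have hb : 0 < PySem.Int.floordiv n (gs.length : Int) := by
          have h1 : PySem.Int.floordiv n (gs.length : Int) = n / (gs.length : Int) :=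
            PySem.Int.floordiv_eq_ediv_of_pos hL
          have h2 : 0 ≤ n / (gs.length : Int) := Int.ediv_nonneg (by omega) (by omega)
          omega
        rw [if_neg hb0]
        show _ = (PySem.List.pyRange 0 (gs.length : Int) 1).foldl
          (fun docs g =>
            (PySem.List.pyRange (g * PySem.Int.floordiv n (gs.length : Int))
              (if g < (gs.length : Int) - 1
                then (g + 1) * PySem.Int.floordiv n (gs.length : Int) else n) 1).foldl
              (fun docs i => docs ++ [pvElemB gs g i]) docs) []
        set q := PySem.Int.floordiv n (gs.length : Int) with hq
        -- inner folds become appended maps of pvElem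
        have hbody : ∀ (docs : List String) (g : Int),
            g ∈ PySem.List.pyRange 0 (gs.length : Int) 1 →
            (PySem.List.pyRange (g * q) (if g < (gs.length : Int) - 1 then (g + 1) * q else n) 1).foldl
              (fun docs i => docs ++ [pvElemB gs g i]) docs
            = docs ++ (PySem.List.pyRange (g * q)
                (if g < (gs.length : Int) - 1 then (g + 1) * q else n) 1).map (pvElem n gs) := by
          intro docs g hg
          rw [PySem.List.foldl_append_singleton_eq_map]
          congr 1
          apply List.map_congr_left
          intro i hi
          rw [PySem.List.mem_pyRange_one] at hg hi
          by_cases hlt : g < (gs.length : Int) - 1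
          · rw [if_pos hlt] at hi
            have hdiv : PySem.Int.floordiv i q = g :=
              (PySem.Int.floordiv_eq_iff_of_pos hb).mpr ⟨hi.1, hi.2⟩
            have hmin : min g ((gs.length : Int) - 1) = g := by omega
            simp only [pvElem, pvElemB, ← hq, if_pos hb]
            rw [hdiv, hmin]
          · rw [if_neg hlt] at hi
            have hge : g = (gs.length : Int) - 1 := by omega
            have hdivge : g ≤ PySem.Int.floordiv i q :=
              (PySem.Int.le_floordiv_iff_mul_le hb).mpr hi.1
            have hmin : min (PySem.Int.floordiv i q) ((gs.length : Int) - 1) = g := by omega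
            simp only [pvElem, pvElemB, ← hq, if_pos hb]
            rw [hmin]
        rw [PySem.List.foldl_congr_mem _ _ _ _ hbody]
        -- split off the last group
        have hL1 : (gs.length : Int) = ((gs.length : Int) - 1) + 1 := by ring
        rw [hL1, PySem.List.pyRange_one_succ_right (by omega), List.foldl_append]
        simp only [add_sub_cancel_right]
        have hfirst : ∀ (docs : List String) (g : Int),
            g ∈ PySem.List.pyRange 0 ((gs.length : Int) - 1) 1 →
            docs ++ (PySem.List.pyRange (g * q)
              (if g < (gs.length : Int) - 1 then (g + 1) * q else n) 1).map (pvElem n gs)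
            = docs ++ (PySem.List.pyRange (g * q) ((g + 1) * q) 1).map (pvElem n gs) := by
          intro docs g hg
          rw [PySem.List.mem_pyRange_one] at hg
          rw [if_pos (by omega)]
        rw [PySem.List.foldl_congr_mem _ _ _ _ hfirst]
        -- cast L - 1 to a Nat to apply pvChunks
        obtain ⟨m, hm⟩ : ∃ m : Nat, (gs.length : Int) - 1 = (m : Int) :=
          ⟨gs.length - 1, by omega⟩
        rw [hm, pvChunks (pvElem n gs) q hb m, List.nil_append]
        simp only [List.foldl_cons, List.foldl_nil, if_neg (lt_irrefl ((m : Int)))]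
        have hle : (m : Int) * q ≤ n := by
          have h1 : q * (gs.length : Int) ≤ n := by
            have := PySem.Int.mod_nonneg n hL
            omega
          have h2 : (m : Int) * q ≤ q * (gs.length : Int) := by nlinarith
          omega
        rw [← List.map_append, ← PySem.List.pyRange_one_append 0 ((m : Int) * q) n (by positivity) hle]
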